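-- pv_equiv track=rewrite | github.com/akashnag/ash | src/ash/core/utils.py | get_wrapped_curpos
-- ===== SOURCE A (Python) =====
-- def get_wrapped_curpos(sublines, x):
-- 	if(len(sublines) <= 1): return (0,x)
--
-- 	i = 0
-- 	vpos = -1
-- 	cpos = x
-- 	for l in sublines:
-- 		if(cpos < len(l)):
-- 			vpos = i
-- 			break
-- 		else:
-- 			cpos -= len(l)
-- 		i += 1
--
-- 	return (vpos, cpos)
-- ===== SOURCE B (Python) =====
-- def get_wrapped_curpos(sublines, x):
--     if len(sublines) <= 1:
--         return (0, x)
--     # prefix-sum table of subline lengths + binary search (bisect_right by hand)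
--     prefix = []
--     t = 0
--     for l in sublines:
--         t += len(l)
--         prefix.append(t)
--     lo, hi = 0, len(prefix)
--     while lo < hi:
--         mid = (lo + hi) // 2
--         if x < prefix[mid]:
--             hi = mid
--         else:
--             lo = mid + 1
--     if lo < len(prefix):
--         return (lo, x - (prefix[lo - 1] if lo > 0 else 0))
--     return (-1, x - prefix[-1])
-- ===== Notes on version B (the rewrite author's own statement) =====
-- stated objective: alternative
-- what changed: Replaces the linear subtract-as-you-go scan over the sublines with a precomputed prefix-sum table of subline lengths plus a hand-written bisect_right binary search over that table.
import Mathlib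
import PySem

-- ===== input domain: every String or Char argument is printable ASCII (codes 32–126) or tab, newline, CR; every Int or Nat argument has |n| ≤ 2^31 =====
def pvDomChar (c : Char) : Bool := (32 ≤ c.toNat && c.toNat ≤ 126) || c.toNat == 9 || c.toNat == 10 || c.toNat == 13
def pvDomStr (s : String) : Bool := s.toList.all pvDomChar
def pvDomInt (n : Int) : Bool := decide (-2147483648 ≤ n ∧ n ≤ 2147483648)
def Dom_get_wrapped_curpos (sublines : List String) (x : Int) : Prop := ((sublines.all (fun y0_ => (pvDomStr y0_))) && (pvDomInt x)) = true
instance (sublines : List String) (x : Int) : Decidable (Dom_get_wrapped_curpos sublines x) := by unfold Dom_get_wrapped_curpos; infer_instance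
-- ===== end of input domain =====

-- B replaces A's linear subtract-as-you-go scan by a prefix-sum table of the
-- subline lengths plus a hand-written bisect_right binary search (alternative
-- decomposition; same observable results).

-- ===== PORT A =====
-- the for-loop with its break: state (i, cpos); falling off the end keeps vpos = -1
def pvLoopA : List String → Int → Int → Int × Int
  | [], _, cpos => (-1, cpos)
  | l :: rest, i, cpos =>
      if cpos < PySem.Str.len l then (i, cpos)
      else pvLoopA rest (i + 1) (cpos - PySem.Str.len l)

def get_wrapped_curpos (sublines : List String) (x : Int) : Int × Int :=
  if sublines.length ≤ 1 then (0, x)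
  else pvLoopA sublines 0 x

-- ===== PORT B =====
-- prefix-sum accumulation loop of Source B
def pvPrefixes : List String → Int → List Int
  | [], _ => []
  | l :: rest, t => (t + PySem.Str.len l) :: pvPrefixes rest (t + PySem.Str.len l)

-- the while lo < hi bisect_right loop of Source B
def pvBsearch (p : List Int) (x : Int) (lo hi : Nat) : Nat :=
  if h : lo < hi then
    let mid := (lo + hi) / 2
    if x < p.getD mid 0 then pvBsearch p x lo mid else pvBsearch p x (mid + 1) hi
  else lo
termination_by hi - lo
decreasing_by all_goals omega

def get_wrapped_curpos_alt (sublines : List String) (x : Int) : Int × Int :=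
  if sublines.length ≤ 1 then (0, x)
  else
    let pref := pvPrefixes sublines 0
    let lo := pvBsearch pref x 0 pref.length
    if lo < pref.length then
      (Int.ofNat lo, x - (if 0 < lo then pref.getD (lo - 1) 0 else 0))
    else (-1, x - pref.getD (pref.length - 1) 0)

-- ===== PRECONDITION & SPEC =====
def Spec_get_wrapped_curpos (sublines : List String) (x : Int) (out : Int × Int) : Prop := out = get_wrapped_curpos_alt sublines x
instance (sublines : List String) (x : Int) (out : Int × Int) : Decidable (Spec_get_wrapped_curpos sublines x out) := by unfold Spec_get_wrapped_curpos; infer_instance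

-- ===== CLAIM (what is proved, stated in full; the proofs are below) =====
def Claim_equal_get_wrapped_curpos : Prop := ∀ (sublines : List String) (x : Int), Dom_get_wrapped_curpos sublines x → Spec_get_wrapped_curpos sublines x (get_wrapped_curpos sublines x)

-- ===== LEMMAS AND PROOFS =====

-- first index of the prefix table strictly exceeding x (list length if none)
def pvFidx (x : Int) : List Int → Nat
  | [] => 0
  | v :: r => if x < v then 0 else pvFidx x r + 1

theorem pvFidx_le_length (x : Int) (p : List Int) : pvFidx x p ≤ p.length := by
  induction p with
  | nil => simp [pvFidx]
  | cons v r ih => simp only [pvFidx, List.length_cons]; split <;> omega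

theorem pvFidx_lt (x : Int) (p : List Int) (i : Nat) (hi : i < pvFidx x p) :
    ¬ x < p.getD i 0 := by
  induction p generalizing i with
  | nil => simp [pvFidx] at hi
  | cons v r ih =>
    simp only [pvFidx] at hi
    by_cases h : x < v
    · simp [h] at hi
    · rw [if_neg h] at hi
      cases i with
      | zero => simpa using h
      | succ j => exact ih j (by omega)

theorem pvFidx_at (x : Int) (p : List Int) (h : pvFidx x p < p.length) :
    x < p.getD (pvFidx x p) 0 := by
  induction p with
  | nil => simp at h
  | cons v r ih =>
    by_cases hv : x < v
    · simp [pvFidx, hv]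
    · simp only [pvFidx, if_neg hv, List.length_cons] at h
      simp only [pvFidx, if_neg hv, List.getD_cons_succ]
      exact ih (by omega)

theorem pvFidx_unique (x : Int) (p : List Int) (k : Nat) (hk : k ≤ p.length)
    (h1 : ∀ i, i < k → ¬ x < p.getD i 0)
    (h2 : k < p.length → x < p.getD k 0) : pvFidx x p = k := by
  rcases Nat.lt_trichotomy (pvFidx x p) k with h | h | h
  · exact absurd (pvFidx_at x p (by omega)) (h1 _ h)
  · exact h
  · exact absurd (h2 (by have := pvFidx_le_length x p; omega)) (pvFidx_lt x p k h)

-- monotone getD of a ≤-pairwise list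
theorem pvMono (p : List Int) (hp : p.Pairwise (· ≤ ·)) (i j : Nat)
    (hij : i ≤ j) (hj : j < p.length) : p.getD i 0 ≤ p.getD j 0 := by
  rcases Nat.lt_or_ge i j with h | h
  · rw [List.getD_eq_getElem _ _ (by omega), List.getD_eq_getElem _ _ hj]
    exact (List.pairwise_iff_getElem.mp hp) i j (by omega) hj h
  · have : i = j := by omega
    subst this; rfl

theorem pvBsearch_eq (p : List Int) (x : Int) (hp : p.Pairwise (· ≤ ·)) :
    ∀ d lo hi, hi - lo = d → lo ≤ hi → hi ≤ p.length →
    (∀ i, i < lo → ¬ x < p.getD i 0) →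
    (∀ i, hi ≤ i → i < p.length → x < p.getD i 0) →
    pvBsearch p x lo hi = pvFidx x p := by
  intro d
  induction d using Nat.strong_induction_on with
  | _ d ih =>
    intro lo hi hd hlh hhi h1 h2
    rw [pvBsearch]
    by_cases h : lo < hi
    · rw [dif_pos h]
      by_cases hm : x < p.getD ((lo + hi) / 2) 0
      · rw [if_pos hm]
        refine ih (((lo + hi) / 2) - lo) (by omega) lo _ rfl (by omega) (by omega) h1 ?_
        intro i himid hilen
        exact lt_of_lt_of_le hm (pvMono p hp _ i himid hilen)
      · rw [if_neg hm]
        refine ih (hi - ((lo + hi) / 2 + 1)) (by omega) _ hi rfl (by omega) hhi ?_ h2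
        intro i hi' hxi
        exact hm (lt_of_lt_of_le hxi (pvMono p hp i _ (by omega) (by omega)))
    · rw [dif_neg h]
      have hlo : lo = hi := by omega
      subst hlo
      exact (pvFidx_unique x p lo (by omega) (fun i hi' => h1 i hi')
        (fun hlt => h2 lo (le_refl _) hlt)).symm

-- pvPrefixes facts
theorem pvPrefixes_length (ls : List String) (a : Int) :
    (pvPrefixes ls a).length = ls.length := by
  induction ls generalizing a with
  | nil => rfl
  | cons l r ih => simp [pvPrefixes, ih]

theorem pvLen_nonneg (s : String) : 0 ≤ PySem.Str.len s := by
  simp [PySem.Str.len_eq]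

theorem pvPrefixes_ge (ls : List String) (a : Int) (b : Int)
    (hb : b ∈ pvPrefixes ls a) : a ≤ b := by
  induction ls generalizing a with
  | nil => simp [pvPrefixes] at hb
  | cons l r ih =>
    simp only [pvPrefixes, List.mem_cons] at hb
    have h0 := pvLen_nonneg l
    rcases hb with rfl | hb
    · omega
    · have := ih (a + PySem.Str.len l) hb; omega

theorem pvPrefixes_pairwise (ls : List String) (a : Int) :
    (pvPrefixes ls a).Pairwise (· ≤ ·) := by
  induction ls generalizing a with
  | nil => simp [pvPrefixes]
  | cons l r ih =>
    simp only [pvPrefixes]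
    exact List.pairwise_cons.mpr ⟨fun b hb => pvPrefixes_ge r _ b hb, ih _⟩

theorem pvPrefixes_shift (ls : List String) (a b : Int) :
    pvPrefixes ls (a + b) = (pvPrefixes ls b).map (a + ·) := by
  induction ls generalizing b with
  | nil => rfl
  | cons l r ih =>
    simp only [pvPrefixes, List.map_cons]
    rw [show a + b + PySem.Str.len l = a + (b + PySem.Str.len l) by ring]
    rw [ih (b + PySem.Str.len l)]

theorem pvFidx_map_add (x a : Int) (q : List Int) :
    pvFidx x (q.map (a + ·)) = pvFidx (x - a) q := by
  induction q with
  | nil => rfl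
  | cons v r ih =>
    simp only [List.map_cons, pvFidx, ih]
    congr 1
    simp only [eq_iff_iff]
    omega

theorem pvGetD_map_add (a : Int) (q : List Int) (i : Nat) (h : i < q.length) :
    (q.map (a + ·)).getD i 0 = a + q.getD i 0 := by
  rw [List.getD_eq_getElem _ _ (by simpa using h), List.getD_eq_getElem _ _ h]
  simp

-- characterization of A's loop by the prefix table
theorem pvLoopA_eq (ls : List String) (i x : Int) :
    pvLoopA ls i x =
      (let p := pvPrefixes ls 0
       let j := pvFidx x p
       if j < ls.length then
         (i + (j : Int), x - (if 0 < j then p.getD (j - 1) 0 else 0))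
       else (-1, x - p.getD (ls.length - 1) 0)) := by
  induction ls generalizing i x with
  | nil => simp [pvLoopA, pvFidx, pvPrefixes]
  | cons l r ih =>
    simp only [pvLoopA]
    set a := PySem.Str.len l with ha
    have hplist : pvPrefixes (l :: r) 0 = a :: (pvPrefixes r 0).map (a + ·) := by
      show (0 + a) :: pvPrefixes r (0 + a) = _
      rw [zero_add]
      have := pvPrefixes_shift r a 0
      rw [show a + 0 = a by omega] at this
      rw [this]
    by_cases hx : x < a
    · rw [if_pos hx]
      have hj : pvFidx x (pvPrefixes (l :: r) 0) = 0 := by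
        rw [hplist]; simp [pvFidx, hx]
      simp [hj]
    · rw [if_neg hx]
      rw [ih (i + 1) (x - a)]
      have hj : pvFidx x (pvPrefixes (l :: r) 0)
          = pvFidx (x - a) (pvPrefixes r 0) + 1 := by
        rw [hplist]
        simp only [pvFidx]
        rw [if_neg hx, pvFidx_map_add]
      rw [hj, hplist]
      simp only [List.length_cons]
      set j' := pvFidx (x - a) (pvPrefixes r 0) with hj'
      have hjle : j' ≤ (pvPrefixes r 0).length := pvFidx_le_length _ _
      have hlen : (pvPrefixes r 0).length = r.length := pvPrefixes_length r 0
      by_cases hlt : j' < r.length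
      · rw [if_pos (by omega : j' + 1 < r.length + 1), if_pos hlt]
        rw [if_pos (by omega : 0 < j' + 1)]
        cases hj'' : j' with
        | zero =>
          simp only [Nat.add_sub_cancel, List.getD_cons_zero, Nat.lt_irrefl, if_false]
          rw [Prod.mk.injEq]
          exact ⟨by push_cast; ring, by ring⟩
        | succ k =>
          rw [if_pos (by omega : 0 < k + 1)]
          simp only [Nat.add_sub_cancel, List.getD_cons_succ]
          rw [pvGetD_map_add a _ k (by omega)]
          rw [Prod.mk.injEq]
          exact ⟨by push_cast; ring, by ring⟩
      · rw [if_neg (by omega : ¬ j' + 1 < r.length + 1), if_neg hlt]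
        simp only [Nat.add_sub_cancel]
        rcases r with _ | ⟨s, r'⟩
        · simp [pvPrefixes]
        · rw [show ((s :: r').length : Nat) = ((s :: r').length - 1) + 1 by
            simp, List.getD_cons_succ, pvGetD_map_add a _ _ (by simp [pvPrefixes_length])]
          rw [Prod.mk.injEq]
          exact ⟨rfl, by rw [Nat.add_sub_cancel]; ring⟩

theorem pvBsearch_full (p : List Int) (x : Int) (hp : p.Pairwise (· ≤ ·)) :
    pvBsearch p x 0 p.length = pvFidx x p :=
  pvBsearch_eq p x hp p.length 0 p.length (by omega) (by omega) (le_refl _)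
    (fun i hi => absurd hi (by omega)) (fun i h1 h2 => absurd (lt_of_le_of_lt h1 h2) (lt_irrefl _))

-- ===== VERDICT (by name: the statement is the Claim_ definition above) =====
theorem get_wrapped_curpos_spec : Claim_equal_get_wrapped_curpos := by
  intro sublines x _
  unfold Spec_get_wrapped_curpos get_wrapped_curpos get_wrapped_curpos_alt
  by_cases h1 : sublines.length ≤ 1
  · rw [if_pos h1, if_pos h1]
  · rw [if_neg h1, if_neg h1]
    show pvLoopA sublines 0 x =
      (if pvBsearch (pvPrefixes sublines 0) x 0 (pvPrefixes sublines 0).length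
            < (pvPrefixes sublines 0).length then
        (Int.ofNat (pvBsearch (pvPrefixes sublines 0) x 0 (pvPrefixes sublines 0).length),
          x - (if 0 < pvBsearch (pvPrefixes sublines 0) x 0 (pvPrefixes sublines 0).length then
            (pvPrefixes sublines 0).getD
              (pvBsearch (pvPrefixes sublines 0) x 0 (pvPrefixes sublines 0).length - 1) 0
          else 0))
      else (-1, x - (pvPrefixes sublines 0).getD ((pvPrefixes sublines 0).length - 1) 0))
    rw [pvBsearch_full _ x (pvPrefixes_pairwise sublines 0)]
    rw [pvLoopA_eq]
    simp only [pvPrefixes_length]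
    split
    · simp
    · rfl
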